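-- pv_equiv track=rewrite | github.com/pongthang/pongthang.github.io | question8.py | total_run_in_a_year
-- ===== SOURCE A (Python) =====
-- def total_run_in_a_year(runs,years):
--     run_in_a_year ={}
--     s=0
--     for i in range(len(runs)):
--         if i==len(runs)-1:
--             s+=runs[i]
--             run_in_a_year[years[i]]=s
--             break
--         if years[i]==years[i+1]:
--             s+=runs[i]
--             continue
--         elif years[i]!=years[i+1]:
--             s+=runs[i]
--             run_in_a_year[years[i]]=s
--             s=0
--     return run_in_a_year
-- ===== SOURCE B (Python) =====
-- def _rle(ys):
--     # run-length encoding of ys, built right-to-left (prepend = append to the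
--     # reversed accumulator), then reversed into forward order
--     rgroups = []
--     for y in reversed(ys):
--         if rgroups and rgroups[-1][0] == y:
--             rgroups[-1] = (y, rgroups[-1][1] + 1)
--         else:
--             rgroups.append((y, 1))
--     return rgroups[::-1]
--
--
-- def total_run_in_a_year(runs, years):
--     ys = years[:len(runs)]
--     d = {}
--     i = 0
--     for y, k in _rle(ys):
--         d[y] = sum(runs[i:i + k])
--         i += k
--     return d
-- ===== Notes on version B (the rewrite author's own statement) =====
-- stated objective: alternative
-- what changed: A's single index loop with a running accumulator and break is replaced by a two-pass decomposition: first run-length-encode years[:len(runs)] (built right-to-left), then assign each group's slice-sum sum(runs[i:i+k]) into the dict.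
import Mathlib
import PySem

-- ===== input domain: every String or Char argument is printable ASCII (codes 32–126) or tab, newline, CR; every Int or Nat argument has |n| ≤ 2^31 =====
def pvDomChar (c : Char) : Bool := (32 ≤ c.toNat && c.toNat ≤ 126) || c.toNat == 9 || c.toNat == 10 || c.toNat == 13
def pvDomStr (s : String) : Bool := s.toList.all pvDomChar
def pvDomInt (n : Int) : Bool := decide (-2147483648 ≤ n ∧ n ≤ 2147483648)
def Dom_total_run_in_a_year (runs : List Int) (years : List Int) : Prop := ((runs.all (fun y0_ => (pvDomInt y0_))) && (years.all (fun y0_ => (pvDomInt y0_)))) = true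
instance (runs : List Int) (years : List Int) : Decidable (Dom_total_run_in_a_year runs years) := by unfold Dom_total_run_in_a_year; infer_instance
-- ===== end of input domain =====

-- B replaces A's single accumulator loop by a two-pass decomposition: run-length-encode
-- the (truncated) years list, then assign each group's slice-sum into the dict (objective: alternative).


-- ===== PORT A =====
-- 'for i in range(len(runs))' with break, state (s, run_in_a_year)
def pvALoop (runs : List Int) (years : List Int) (i : Nat) (s : Int)
    (d : PySem.Dict Int Int) : PySem.Dict Int Int :=
  if i < runs.length then
    if i = runs.length - 1 then
      (d.insert (PySem.List.pyGetD years (i : Int) 0)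
        (s + PySem.List.pyGetD runs (i : Int) 0))
    else if PySem.List.pyGetD years (i : Int) 0
            = PySem.List.pyGetD years ((i : Int) + 1) 0 then
      pvALoop runs years (i + 1) (s + PySem.List.pyGetD runs (i : Int) 0) d
    else
      pvALoop runs years (i + 1) 0
        (d.insert (PySem.List.pyGetD years (i : Int) 0)
          (s + PySem.List.pyGetD runs (i : Int) 0))
  else d
termination_by runs.length - i

def total_run_in_a_year (runs : List Int) (years : List Int) : List (Int × Int) :=
  (pvALoop runs years 0 0 PySem.Dict.empty).items

-- ===== PORT B =====
-- _rle's loop over reversed(ys): last-element update / append on the reversed accumulator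
def pvRleStep (gs : List (Int × Nat)) (y : Int) : List (Int × Nat) :=
  match gs.getLast? with
  | some (y0, k) => if y0 = y then gs.dropLast ++ [(y, k + 1)] else gs ++ [(y, 1)]
  | none => gs ++ [(y, 1)]

def pvRle (ys : List Int) : List (Int × Nat) :=
  (ys.reverse.foldl pvRleStep []).reverse

-- second loop: d[y] = sum(runs[i:i+k]); i += k
def pvBLoop (runs : List Int) (gs : List (Int × Nat)) (i : Nat)
    (d : PySem.Dict Int Int) : PySem.Dict Int Int :=
  match gs with
  | [] => d
  | (y, k) :: rest =>
      pvBLoop runs rest (i + k)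
        (d.insert y (PySem.List.slice runs (some (i : Int)) (some ((i : Int) + (k : Int)))).sum)

def total_run_in_a_year_alt (runs : List Int) (years : List Int) : List (Int × Int) :=
  (pvBLoop runs
    (pvRle (PySem.List.slice years none (some (runs.length : Int))))
    0 PySem.Dict.empty).items

-- ===== PRECONDITION & SPEC =====
-- A indexes years[i] (and years[i+1]) for every i < len(runs): it raises IndexError iff years is shorter than runs.
def Pre_total_run_in_a_year (runs : List Int) (years : List Int) : Prop :=
  runs.length ≤ years.length
instance (runs : List Int) (years : List Int) : Decidable (Pre_total_run_in_a_year runs years) := by unfold Pre_total_run_in_a_year; infer_instance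

def pvWitness_total_run_in_a_year : List Int × List Int := ([10, 20, 5], [2020, 2020, 2021])

def Spec_total_run_in_a_year (runs : List Int) (years : List Int) (out : List (Int × Int)) : Prop := out = total_run_in_a_year_alt runs years
instance (runs : List Int) (years : List Int) (out : List (Int × Int)) : Decidable (Spec_total_run_in_a_year runs years out) := by unfold Spec_total_run_in_a_year; infer_instance

-- ===== CLAIM (what is proved, stated in full; the proofs are below) =====
def Claim_equal_total_run_in_a_year : Prop := ∀ (runs : List Int) (years : List Int), Dom_total_run_in_a_year runs years → Pre_total_run_in_a_year runs years → Spec_total_run_in_a_year runs years (total_run_in_a_year runs years)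

-- ===== LEMMAS AND PROOFS =====

-- structural version of A's loop
def pvGoA : List Int → List Int → Int → PySem.Dict Int Int → PySem.Dict Int Int
  | [], _, _, d => d
  | [r], y :: _, s, d => d.insert y (s + r)
  | [_], [], _, d => d
  | r :: r' :: rs, y :: y' :: ys, s, d =>
      if y = y' then pvGoA (r' :: rs) (y' :: ys) (s + r) d
      else pvGoA (r' :: rs) (y' :: ys) 0 (d.insert y (s + r))
  | _ :: _ :: _, _, _, d => d

-- suffix-recursive run-length encoding (what pvRle computes)
def pvRleR : List Int → List (Int × Nat)
  | [] => []
  | y :: ys =>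
    match pvRleR ys with
    | (y0, k) :: rest => if y0 = y then (y, k + 1) :: rest else (y, 1) :: (y0, k) :: rest
    | [] => [(y, 1)]

-- structural version of B's second loop, with A's carried accumulator folded into the first group
def pvGoB : List Int → List (Int × Nat) → Int → PySem.Dict Int Int → PySem.Dict Int Int
  | _, [], _, d => d
  | rs, (y, k) :: rest, s, d => pvGoB (rs.drop k) rest 0 (d.insert y (s + (rs.take k).sum))

lemma pvRle_eq_pvRleR (ys : List Int) : pvRle ys = pvRleR ys := by
  suffices h : ∀ l : List Int, l.reverse.foldl pvRleStep [] = (pvRleR l).reverse by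
    simp [pvRle, h]
  intro l
  induction l with
  | nil => simp [pvRleR]
  | cons y ys ih =>
    rw [List.reverse_cons, List.foldl_append, ih]
    simp only [List.foldl_cons, List.foldl_nil, pvRleStep, pvRleR]
    cases hr : pvRleR ys with
    | nil => simp
    | cons p rest =>
      obtain ⟨y0, k⟩ := p
      by_cases hy : y0 = y
      · subst hy; simp [List.getLast?_append]
      · simp [List.getLast?_append, hy]

lemma pvALoop_eq_pvGoA (runs years : List Int) (h : runs.length ≤ years.length) :
    ∀ n i s d, runs.length - i ≤ n →
      pvALoop runs years i s d = pvGoA (runs.drop i) (years.drop i) s d := by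
  intro n
  induction n with
  | zero =>
    intro i s d hn
    have hi : runs.length ≤ i := by omega
    rw [pvALoop]
    simp [Nat.not_lt.mpr hi, List.drop_eq_nil_of_le hi, pvGoA]
  | succ n ih =>
    intro i s d hn
    rw [pvALoop]
    by_cases hi : i < runs.length
    · have hiy : i < years.length := by omega
      have hdr : runs.drop i = runs[i] :: runs.drop (i + 1) := List.drop_eq_getElem_cons hi
      have hdy : years.drop i = years[i] :: years.drop (i + 1) := List.drop_eq_getElem_cons hiy
      have hgr : PySem.List.pyGetD runs (i : Int) 0 = runs[i] := by
        simp [PySem.List.pyGetD_natCast, List.getD_eq_getElem?_getD, hi]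
      have hgy : PySem.List.pyGetD years (i : Int) 0 = years[i] := by
        simp [PySem.List.pyGetD_natCast, List.getD_eq_getElem?_getD, hiy]
      by_cases hlast : i = runs.length - 1
      · have hnil : runs.drop (i + 1) = [] := List.drop_eq_nil_of_le (by omega)
        rw [if_pos hi, if_pos hlast, hdr, hdy, hnil, hgy, hgr]
        rfl
      · have hi1 : i + 1 < runs.length := by omega
        have hi1y : i + 1 < years.length := by omega
        have hdr1 : runs.drop (i + 1) = runs[i + 1] :: runs.drop (i + 2) :=
          List.drop_eq_getElem_cons hi1
        have hdy1 : years.drop (i + 1) = years[i + 1] :: years.drop (i + 2) :=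
          List.drop_eq_getElem_cons hi1y
        have hgy1 : PySem.List.pyGetD years ((i : Int) + 1) 0 = years[i + 1] := by
          have hg := PySem.List.pyGetD_eq_getElem (xs := years) (i := (i : Int) + 1) (d := 0)
            (by omega) (by omega)
          rw [hg]
          congr 1
        rw [if_pos hi, if_neg hlast, hgy, hgy1, hgr, hdr, hdy, hdr1, hdy1]
        by_cases hyy : years[i] = years[i + 1]
        · rw [if_pos hyy]
          show pvALoop runs years (i + 1) _ d = _
          rw [ih (i + 1) _ d (by omega), hdr1, hdy1]
          simp [pvGoA, hyy]
        · rw [if_neg hyy]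
          show pvALoop runs years (i + 1) 0 _ = _
          rw [ih (i + 1) 0 _ (by omega), hdr1, hdy1]
          simp [pvGoA, hyy]
    · have hge : runs.length ≤ i := by omega
      rw [if_neg hi]
      simp [List.drop_eq_nil_of_le hge, pvGoA]

lemma pvGoA_take : ∀ (rs ys : List Int) (s : Int) (d : PySem.Dict Int Int),
    pvGoA rs ys s d = pvGoA rs (ys.take rs.length) s d := by
  intro rs
  induction rs with
  | nil => intro ys s d; cases ys <;> rfl
  | cons r rs ih =>
    intro ys s d
    cases ys with
    | nil => cases rs <;> rfl
    | cons y ys' =>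
      cases rs with
      | nil => rfl
      | cons r' rs' =>
        cases ys' with
        | nil => rfl
        | cons y' ys'' =>
          show pvGoA (r :: r' :: rs') (y :: y' :: ys'') s d
              = pvGoA (r :: r' :: rs') (y :: (y' :: ys'').take (r' :: rs').length) s d
          simp only [List.length_cons, List.take_succ_cons, pvGoA]
          by_cases h : y = y'
          · rw [if_pos h, if_pos h, ih]
            simp [List.take_succ_cons]
          · rw [if_neg h, if_neg h, ih]
            simp [List.take_succ_cons]

lemma pvRleR_head (y : Int) (ys : List Int) :
    ∃ k rest, pvRleR (y :: ys) = (y, k) :: rest := by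
  show ∃ k rest, (match pvRleR ys with
    | (y0, k) :: rest => if y0 = y then (y, k + 1) :: rest else (y, 1) :: (y0, k) :: rest
    | [] => [(y, 1)]) = (y, k) :: rest
  cases h : pvRleR ys with
  | nil => exact ⟨1, [], rfl⟩
  | cons p rest =>
    obtain ⟨y0, k⟩ := p
    by_cases hy : y0 = y
    · exact ⟨k + 1, rest, by simp [hy]⟩
    · exact ⟨1, (y0, k) :: rest, by simp [hy]⟩

lemma pvGoA_eq_pvGoB : ∀ (ys rs : List Int) (s : Int) (d : PySem.Dict Int Int),
    rs.length = ys.length → pvGoA rs ys s d = pvGoB rs (pvRleR ys) s d := by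
  intro ys
  induction ys with
  | nil =>
    intro rs s d h
    rw [List.length_eq_zero_iff.mp h]
    rfl
  | cons y ys' ih =>
    intro rs s d h
    obtain ⟨r, rs', rfl⟩ : ∃ a l, rs = a :: l := by
      cases rs with
      | nil => simp at h
      | cons a l => exact ⟨a, l, rfl⟩
    cases ys' with
    | nil =>
      obtain rfl : rs' = [] := by simpa using h
      show d.insert y (s + r) = pvGoB [r] [(y, 1)] s d
      simp [pvGoB]
    | cons y' ys'' =>
      obtain ⟨r', rs'', rfl⟩ : ∃ a l, rs' = a :: l := by
        cases rs' with
        | nil => simp at h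
        | cons a l => exact ⟨a, l, rfl⟩
      have hlen : (r' :: rs'').length = (y' :: ys'').length := by simpa using h
      obtain ⟨k, rest, hk⟩ := pvRleR_head y' ys''
      have hrle : pvRleR (y :: y' :: ys'') =
          if y' = y then (y, k + 1) :: rest else (y, 1) :: (y', k) :: rest := by
        show (match pvRleR (y' :: ys'') with
          | (y0, k) :: rest => if y0 = y then (y, k + 1) :: rest else (y, 1) :: (y0, k) :: rest
          | [] => [(y, 1)]) = _
        rw [hk]
      show (if y = y' then pvGoA (r' :: rs'') (y' :: ys'') (s + r) d
           else pvGoA (r' :: rs'') (y' :: ys'') 0 (d.insert y (s + r)))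
          = pvGoB (r :: r' :: rs'') (pvRleR (y :: y' :: ys'')) s d
      by_cases hy : y = y'
      · rw [if_pos hy, hrle, if_pos hy.symm, ih _ _ _ hlen, hk]
        show pvGoB ((r' :: rs'').drop k) rest 0
            (d.insert y' ((s + r) + ((r' :: rs'').take k).sum)) = _
        show _ = pvGoB ((r :: r' :: rs'').drop (k + 1)) rest 0
            (d.insert y (s + ((r :: r' :: rs'').take (k + 1)).sum))
        rw [hy]
        simp [List.take_succ_cons, List.drop_succ_cons, add_assoc]
      · rw [if_neg hy, hrle, if_neg (fun hh => hy hh.symm), ih _ _ _ hlen, hk]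
        show pvGoB (r' :: rs'') ((y', k) :: rest) 0 (d.insert y (s + r)) = _
        show _ = pvGoB ((r :: r' :: rs'').drop 1) ((y', k) :: rest) 0
            (d.insert y (s + ((r :: r' :: rs'').take 1).sum))
        simp

lemma pvBLoop_eq_pvGoB (runs : List Int) :
    ∀ (gs : List (Int × Nat)) (i : Nat) (d : PySem.Dict Int Int),
      pvBLoop runs gs i d = pvGoB (runs.drop i) gs 0 d := by
  intro gs
  induction gs with
  | nil => intro i d; rfl
  | cons p rest ih =>
    intro i d
    obtain ⟨y, k⟩ := p
    show pvBLoop runs rest (i + k)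
        (d.insert y (PySem.List.slice runs (some (i : Int)) (some ((i : Int) + (k : Int)))).sum)
        = pvGoB ((runs.drop i).drop k) rest 0
            (d.insert y (0 + ((runs.drop i).take k).sum))
    rw [ih, PySem.List.slice_natCast_add, List.drop_drop, zero_add]

-- ===== VERDICT (by name: the statement is the Claim_ definition above) =====
theorem total_run_in_a_year_spec : Claim_equal_total_run_in_a_year := by
  intro runs years _ hpre
  unfold Spec_total_run_in_a_year total_run_in_a_year total_run_in_a_year_alt
  have htake : PySem.List.slice years none (some (runs.length : Int)) = years.take runs.length :=
    PySem.List.slice_to_natCast years runs.length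
  have hlen : runs.length = (years.take runs.length).length := by
    simp [List.length_take, Nat.min_eq_left hpre]
  rw [pvALoop_eq_pvGoA runs years hpre (runs.length) 0 0 PySem.Dict.empty (by omega),
      List.drop_zero, List.drop_zero, pvGoA_take, pvGoA_eq_pvGoB _ _ _ _ hlen,
      htake, pvBLoop_eq_pvGoB, List.drop_zero, pvRle_eq_pvRleR]
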